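-- pv_equiv track=rewrite | github.com/valmir-filho/python | codewars/files-400-to-499/challenge401.py | detect_monster
-- ===== SOURCE A (Python) =====
-- def detect_monster(s):
--     monsters = [
--         "Hydra", "Nekros", "Cyclops", "Minotaur", "Cerberus", "Chimera",
--         "Harpy", "Gorgon", "Kraken", "Siren", "Furies", "Satyr"
--     ]
--
--     if not s:
--         return "None"
--
--     sl = s.lower()
--
--     def earliest_match(word: str):
--         w = word.lower()
--         first = w[0]
--
--         # try every possible start position for the first letter, left-to-right.
--         for i, ch in enumerate(sl):
--             if ch != first:
--                 continue
--
--             pos = i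
--             ok = True
--
--             # greedily find subsequent letters after the current position.
--             for wc in w[1:]:
--                 nxt = sl.find(wc, pos + 1)
--                 if nxt == -1:
--                     ok = False
--                     break
--                 pos = nxt
--
--             if ok:
--                 # i = start index, pos = end index.
--                 return (i, pos, word)
--
--         return None
--
--     best = None
--     for m in monsters:
--         res = earliest_match(m)
--         if res is None:
--             continue
--         if best is None or (res[0], res[1]) < (best[0], best[1]):
--             best = res
--
--     return best[2] if best else "None"
-- ===== SOURCE B (Python) =====
-- def detect_monster(s):
--     monsters = [
--         "Hydra", "Nekros", "Cyclops", "Minotaur", "Cerberus", "Chimera",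
--         "Harpy", "Gorgon", "Kraken", "Siren", "Furies", "Satyr"
--     ]
--
--     if not s:
--         return "None"
--
--     sl = s.lower()
--
--     def scan(word):
--         # single left-to-right pass: match the word greedily as a subsequence,
--         # anchored at the first occurrence of its first letter.
--         w = word.lower()
--         rem = w          # suffix of w still to match
--         start = -1
--         last = -1
--         for i, ch in enumerate(sl):
--             if not rem:
--                 break
--             if ch == rem[0]:
--                 if start < 0:
--                     start = i
--                 rem = rem[1:]
--                 last = i
--         if rem:
--             return None
--         return (start, last, word)
--
--     candidates = [r for r in (scan(m) for m in monsters) if r is not None]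
--
--     best = None
--     for r in candidates:
--         if best is None or (r[0], r[1]) < (best[0], best[1]):
--             best = r
--     return best[2] if best else "None"
-- ===== Notes on version B (the rewrite author's own statement) =====
-- stated objective: faster
-- what changed: A tries every occurrence of a monster's first letter and reruns a str.find-based greedy chain from each (worst-case quadratic per monster); B makes one left-to-right state-machine pass per monster, anchored at the first occurrence of the first letter, which provably yields the same (start, end) match.
import Mathlib
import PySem

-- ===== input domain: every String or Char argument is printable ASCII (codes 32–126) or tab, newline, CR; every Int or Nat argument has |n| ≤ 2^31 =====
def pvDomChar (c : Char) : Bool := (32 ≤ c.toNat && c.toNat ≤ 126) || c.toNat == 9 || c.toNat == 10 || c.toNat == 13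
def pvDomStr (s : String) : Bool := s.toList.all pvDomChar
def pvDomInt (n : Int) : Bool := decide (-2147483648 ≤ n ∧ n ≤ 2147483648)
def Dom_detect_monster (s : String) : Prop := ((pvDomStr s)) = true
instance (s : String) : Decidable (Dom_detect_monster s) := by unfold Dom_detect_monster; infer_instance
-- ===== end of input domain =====

-- B replaces A's try-every-start + repeated str.find greedy matcher (worst-case quadratic per
-- monster) by a single left-to-right state-machine pass per monster; selection among monsters
-- is unchanged (first monster with lexicographically least (start, end)).

def pvMonsters : List String :=
  ["Hydra", "Nekros", "Cyclops", "Minotaur", "Cerberus", "Chimera",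
   "Harpy", "Gorgon", "Kraken", "Siren", "Furies", "Satyr"]

-- ===== PORT A =====
-- inner loop 'for wc in w[1:]' of earliest_match (pos accumulator; ok=False/break = none)
def pvChainA (tl : List Char) : List Char → Int → Option Int
  | [], pos => some pos
  | wc :: rest, pos =>
    let nxt := PySem.Chars.findFrom tl [wc] (pos + 1) none
    if nxt = -1 then none else pvChainA tl rest nxt

-- outer loop 'for i, ch in enumerate(sl)' of earliest_match
def pvOuterA (tl : List Char) (first : Char) (wtail : List Char) : Nat → List Char → Option (Int × Int)
  | _, [] => none
  | i, ch :: u =>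
    if ch ≠ first then pvOuterA tl first wtail (i + 1) u
    else
      match pvChainA tl wtail (i : Int) with
      | none => pvOuterA tl first wtail (i + 1) u
      | some pos => some ((i : Int), pos)

def pvEarliestMatch (tl : List Char) (word : String) : Option (Int × Int) :=
  match (PySem.Str.lower word).toList with
  | [] => none  -- unreachable: every monster name is nonempty (w[0] would raise otherwise)
  | first :: wtail => pvOuterA tl first wtail 0 tl

def detect_monster (s : String) : String :=
  if s = "" then "None"
  else
    let tl := (PySem.Str.lower s).toList
    let best := pvMonsters.foldl
      (fun best m =>
        match pvEarliestMatch tl m with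
        | none => best
        | some r =>
          match best with
          | none => some (r.1, r.2, m)
          | some b => if r.1 < b.1 ∨ (r.1 = b.1 ∧ r.2 < b.2.1) then some (r.1, r.2, m) else best)
      (none : Option (Int × Int × String))
    match best with
    | some b => b.2.2
    | none => "None"

-- ===== PORT B =====
-- scan's 'for i, ch in enumerate(sl)' loop: state (rem, start, last)
def pvScanLoop : List Char → Int → List Char → Int → Int → (List Char × Int × Int)
  | [], _, rem, start, last => (rem, start, last)
  | ch :: u, i, rem, start, last =>
    match rem with
    | [] => ([], start, last)
    | rc :: rtail =>
      if ch = rc then pvScanLoop u (i + 1) rtail (if start < 0 then i else start) i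
      else pvScanLoop u (i + 1) (rc :: rtail) start last

def pvScan (tl : List Char) (word : String) : Option (Int × Int) :=
  match pvScanLoop tl 0 (PySem.Str.lower word).toList (-1) (-1) with
  | ([], start, last) => some (start, last)
  | _ => none

def detect_monster_alt (s : String) : String :=
  if s = "" then "None"
  else
    let tl := (PySem.Str.lower s).toList
    let candidates := pvMonsters.filterMap (fun m => (pvScan tl m).map (fun p => (p.1, p.2, m)))
    let best := candidates.foldl
      (fun best r =>
        match best with
        | none => some r
        | some b => if r.1 < b.1 ∨ (r.1 = b.1 ∧ r.2.1 < b.2.1) then some r else best)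
      (none : Option (Int × Int × String))
    match best with
    | some b => b.2.2
    | none => "None"

-- ===== PRECONDITION & SPEC =====
def Spec_detect_monster (s : String) (out : String) : Prop := out = detect_monster_alt s
instance (s : String) (out : String) : Decidable (Spec_detect_monster s out) := by unfold Spec_detect_monster; infer_instance

-- ===== CLAIM (what is proved, stated in full; the proofs are below) =====
def Claim_equal_detect_monster : Prop := ∀ (s : String), Dom_detect_monster s → Spec_detect_monster s (detect_monster s)

-- ===== LEMMAS AND PROOFS =====

-- first index of character c (relative), or none
def pvFind (c : Char) : List Char → Option Nat
  | [] => none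
  | x :: u => if x = c then some 0 else (pvFind c u).map (· + 1)

-- greedy chain in Nat form: match each char of rem at the least index > previous
def pvCH (tl : List Char) : List Char → Nat → Option Nat
  | [], p => some p
  | c :: rest, p =>
    match pvFind c (tl.drop (p + 1)) with
    | none => none
    | some d => pvCH tl rest (p + 1 + d)

theorem pvFind_none_iff (c : Char) (u : List Char) : pvFind c u = none ↔ c ∉ u := by
  induction u with
  | nil => simp [pvFind]
  | cons x u ih =>
    by_cases hx : x = c
    · subst hx; simp [pvFind]
    · simp [pvFind, hx, Option.map_eq_none_iff, ih, Ne.symm hx]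

theorem pvFind_some_get (c : Char) (u : List Char) (d : Nat) (h : pvFind c u = some d) :
    u[d]? = some c := by
  induction u generalizing d with
  | nil => simp [pvFind] at h
  | cons x u ih =>
    by_cases hx : x = c
    · simp [pvFind, hx] at h; subst hx h; simp
    · simp [pvFind, hx, Option.map_eq_some_iff] at h
      obtain ⟨d', hd', rfl⟩ := h
      simpa using ih d' hd'

theorem pvFind_some_min (c : Char) (u : List Char) (d : Nat) (h : pvFind c u = some d)
    (j : Nat) (hj : u[j]? = some c) : d ≤ j := by
  induction u generalizing d j with
  | nil => simp at hj
  | cons x u ih =>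
    by_cases hx : x = c
    · simp [pvFind, hx] at h; omega
    · simp [pvFind, hx, Option.map_eq_some_iff] at h
      obtain ⟨d', hd', rfl⟩ := h
      cases j with
      | zero => simp at hj; exact absurd hj hx
      | succ j => simpa using ih d' hd' j (by simpa using hj)

theorem pvFind_some_lt (c : Char) (u : List Char) (d : Nat) (h : pvFind c u = some d) :
    d < u.length := by
  have := pvFind_some_get c u d h
  exact List.getElem?_eq_some_iff.mp this |>.1

-- bridge: PySem find of a single-character needle is pvFind
theorem pvFind_bridge (c : Char) (u : List Char) :
    PySem.Chars.find u [c] = match pvFind c u with | none => (-1 : Int) | some d => (d : Int) := by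
  cases h : pvFind c u with
  | none =>
    rw [PySem.Chars.find_eq_neg_one_iff]
    intro hinf
    have hc : c ∈ u := by simpa using hinf.sublist
    exact (pvFind_none_iff c u).mp h hc
  | some d =>
    have hmem : c ∈ u := List.mem_of_getElem? (pvFind_some_get c u d h)
    have hinf : [c] <:+: u := by
      obtain ⟨s, t, rfl⟩ := List.append_of_mem hmem
      exact ⟨s, t, by simp⟩
    have hnn : 0 ≤ PySem.Chars.find u [c] := (PySem.Chars.find_nonneg_iff u [c]).mpr hinf
    obtain ⟨hpre, hmin⟩ := PySem.Chars.find_spec hnn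
    have hget : u[(PySem.Chars.find u [c]).toNat]? = some c := by
      obtain ⟨t, ht⟩ := hpre
      have h0 : (u.drop (PySem.Chars.find u [c]).toNat)[0]? = some c := by rw [← ht]; simp
      simpa using h0
    have h1 : d ≤ (PySem.Chars.find u [c]).toNat := pvFind_some_min c u d h _ hget
    have h2 : (PySem.Chars.find u [c]).toNat ≤ d := by
      by_contra hlt
      have hdlt : d < (PySem.Chars.find u [c]).toNat := Nat.lt_of_not_le hlt
      have hd := pvFind_some_get c u d h
      refine hmin d hdlt ⟨u.drop (d + 1), ?_⟩
      obtain ⟨hdl, hval⟩ := List.getElem?_eq_some_iff.mp hd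
      have hdrop : u.drop d = c :: u.drop (d + 1) := by
        rw [List.drop_eq_getElem_cons hdl]; simp [hval]
      simp [hdrop]
    have heq : (PySem.Chars.find u [c]).toNat = d := le_antisymm h2 h1
    show PySem.Chars.find u [c] = ((d : Nat) : Int)
    omega

theorem pvFindFrom_bridge (tl : List Char) (c : Char) (k : Nat) (hk : k ≤ tl.length) :
    PySem.Chars.findFrom tl [c] (k : Int) none =
      match pvFind c (tl.drop k) with | none => (-1 : Int) | some d => ((k + d : Nat) : Int) := by
  rw [PySem.Chars.findFrom_natCast tl [c] k hk, pvFind_bridge]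
  cases h : pvFind c (tl.drop k) with
  | none => simp
  | some d =>
    show (if ((d : Nat) : Int) = -1 then (-1 : Int) else (k : Int) + (d : Nat)) = ((k + d : Nat) : Int)
    rw [if_neg (by omega)]
    push_cast; ring

-- A's chain equals pvCH
theorem pvChainA_eq_CH (tl : List Char) (rem : List Char) (p : Nat) (hp : p < tl.length) :
    pvChainA tl rem (p : Int) = (pvCH tl rem p).map (fun e => (e : Int)) := by
  induction rem generalizing p with
  | nil => simp [pvChainA, pvCH]
  | cons c rest ih =>
    have hk : p + 1 ≤ tl.length := hp
    have hb := pvFindFrom_bridge tl c (p + 1) hk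
    rw [pvChainA]
    have harg : (p : Int) + 1 = ((p + 1 : Nat) : Int) := by push_cast; ring
    rw [harg, hb]
    cases h : pvFind c (tl.drop (p + 1)) with
    | none => simp [pvCH, h]
    | some d =>
      have hd : d < (tl.drop (p + 1)).length := pvFind_some_lt c _ d h
      rw [List.length_drop] at hd
      have hlt : p + 1 + d < tl.length := by omega
      have hstep : pvCH tl (c :: rest) p = pvCH tl rest (p + 1 + d) := by simp [pvCH, h]
      show (if ((p + 1 + d : Nat) : Int) = -1 then none
            else pvChainA tl rest ((p + 1 + d : Nat) : Int)) = _
      rw [if_neg (by omega), hstep]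
      exact ih (p + 1 + d) hlt

-- monotonicity: a failing chain keeps failing from any later position
theorem pvCH_mono_none (tl : List Char) (rem : List Char) (p p' : Nat) (hpp : p ≤ p')
    (h : pvCH tl rem p = none) : pvCH tl rem p' = none := by
  induction rem generalizing p p' with
  | nil => simp [pvCH] at h
  | cons c rest ih =>
    rw [pvCH] at h ⊢
    cases h' : pvFind c (tl.drop (p' + 1)) with
    | none => simp
    | some d' =>
      simp only
      have hg := pvFind_some_get c _ d' h'
      have habs : tl[p' + 1 + d']? = some c := by rw [List.getElem?_drop] at hg; exact hg
      have hj : (tl.drop (p + 1))[(p' + 1 + d') - (p + 1)]? = some c := by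
        rw [List.getElem?_drop]
        have harith : p + 1 + (p' + 1 + d' - (p + 1)) = p' + 1 + d' := by omega
        rw [harith]; exact habs
      cases hfp : pvFind c (tl.drop (p + 1)) with
      | none => exact absurd (List.mem_of_getElem? hj) ((pvFind_none_iff c _).mp hfp)
      | some d =>
        rw [hfp] at h
        apply ih (p + 1 + d) (p' + 1 + d') _ h
        have hmin := pvFind_some_min c _ d hfp _ hj
        omega

-- pvScanLoop with empty rem returns immediately
theorem pvScanLoop_nil (u : List Char) (i start last : Int) :
    pvScanLoop u i [] start last = ([], start, last) := by
  cases u <;> rfl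

-- one step of the scan: skip to the first occurrence of the head char
theorem pvScanLoop_find (u : List Char) (i : Int) (c : Char) (cs : List Char) (start last : Int) :
    pvScanLoop u i (c :: cs) start last =
      match pvFind c u with
      | none => (c :: cs, start, last)
      | some d => pvScanLoop (u.drop (d + 1)) (i + d + 1) cs (if start < 0 then i + d else start) (i + d) := by
  induction u generalizing i with
  | nil => rfl
  | cons x u ih =>
    by_cases hx : x = c
    · subst hx
      simp [pvScanLoop, pvFind]
    · rw [pvScanLoop, if_neg (by simpa using Ne.symm (fun h => hx h.symm))]
      rw [ih (i + 1)]
      simp only [pvFind, hx, if_false]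
      cases h : pvFind c u with
      | none => simp
      | some d =>
        simp only [Option.map_some]
        have e4 : List.drop (d + 1 + 1) (x :: u) = u.drop (d + 1) := List.drop_succ_cons
        have e5 : ((d + 1 : Nat) : Int) = (d : Int) + 1 := by push_cast; ring
        rw [e4, e5]
        have h1 : i + 1 + (d : Int) + 1 = i + ((d : Int) + 1) + 1 := by ring
        have h2 : i + 1 + (d : Int) = i + ((d : Int) + 1) := by ring
        rw [h1, h2]

-- the scan after the anchor equals pvCH (start already ≥ 0, last = previous matched index)
theorem pvScanLoop_CH (tl : List Char) (cs : List Char) (p : Nat) (hp : p < tl.length)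
    (start : Int) (hs : 0 ≤ start) :
    (match pvCH tl cs p with
     | some e => pvScanLoop (tl.drop (p + 1)) ((p : Int) + 1) cs start (p : Int) = ([], start, (e : Int))
     | none => (pvScanLoop (tl.drop (p + 1)) ((p : Int) + 1) cs start (p : Int)).1 ≠ []) := by
  induction cs generalizing p start with
  | nil => simp [pvCH, pvScanLoop_nil]
  | cons c rest ih =>
    cases h : pvFind c (tl.drop (p + 1)) with
    | none =>
      have hsf : pvScanLoop (tl.drop (p + 1)) ((p : Int) + 1) (c :: rest) start (p : Int) =
          (c :: rest, start, (p : Int)) := by rw [pvScanLoop_find, h]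
      have hch : pvCH tl (c :: rest) p = none := by simp [pvCH, h]
      rw [hch, hsf]
      simp
    | some d =>
      have hd : d < (tl.drop (p + 1)).length := pvFind_some_lt c _ d h
      rw [List.length_drop] at hd
      have hlt : p + 1 + d < tl.length := by omega
      have hch : pvCH tl (c :: rest) p = pvCH tl rest (p + 1 + d) := by simp [pvCH, h]
      have hsf : pvScanLoop (tl.drop (p + 1)) ((p : Int) + 1) (c :: rest) start (p : Int) =
          pvScanLoop (tl.drop (p + 1 + d + 1)) (((p + 1 + d : Nat) : Int) + 1) rest start
            ((p + 1 + d : Nat) : Int) := by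
        rw [pvScanLoop_find, h]
        show pvScanLoop ((tl.drop (p + 1)).drop (d + 1)) ((p : Int) + 1 + d + 1) rest
            (if start < 0 then (p : Int) + 1 + d else start) ((p : Int) + 1 + d) = _
        rw [List.drop_drop, if_neg (by omega)]
        have e1 : (p : Int) + 1 + d + 1 = ((p + 1 + d : Nat) : Int) + 1 := by push_cast; ring
        have e2 : (p : Int) + 1 + d = ((p + 1 + d : Nat) : Int) := by push_cast; ring
        have e3 : p + 1 + (d + 1) = p + 1 + d + 1 := by omega
        rw [e1, e2, e3]
      rw [hch, hsf]
      exact ih (p + 1 + d) hlt start hs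

-- A's outer loop fails when the chain fails at every occurrence of the first letter
theorem pvOuterA_none (tl : List Char) (c : Char) (cs : List Char) :
    ∀ (u : List Char) (k : Nat), u = tl.drop k →
    (∀ j : Nat, k ≤ j → tl[j]? = some c → pvCH tl cs j = none) →
    pvOuterA tl c cs k u = none := by
  intro u
  induction u with
  | nil => intro k _ _; rfl
  | cons x u ih =>
    intro k hu hfail
    have hnext : u = tl.drop (k + 1) := by
      rw [← List.tail_drop, ← hu]; rfl
    have hk : tl[k]? = some x := by
      have h0 : (tl.drop k)[0]? = some x := by rw [← hu]; simp
      simpa using h0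
    by_cases hx : x = c
    · subst hx
      have hklen : k < tl.length := (List.getElem?_eq_some_iff.mp hk).1
      rw [pvOuterA, if_neg (by simp)]
      have hch : pvChainA tl cs (k : Int) = none := by
        rw [pvChainA_eq_CH tl cs k hklen, hfail k le_rfl hk]; rfl
      rw [hch]
      exact ih (k + 1) hnext (fun j hj hjc => hfail j (by omega) hjc)
    · rw [pvOuterA, if_pos (by simpa using hx)]
      exact ih (k + 1) hnext (fun j hj hjc => hfail j (by omega) hjc)

-- A's outer loop succeeds at the first occurrence when the chain succeeds there
theorem pvOuterA_some (tl : List Char) (c : Char) (cs : List Char) :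
    ∀ (u : List Char) (k d e : Nat), u = tl.drop k →
    pvFind c u = some d → pvCH tl cs (k + d) = some e →
    pvOuterA tl c cs k u = some (((k + d : Nat) : Int), (e : Int)) := by
  intro u
  induction u with
  | nil => intro k d e _ hf _; simp [pvFind] at hf
  | cons x u ih =>
    intro k d e hu hf hch
    have hnext : u = tl.drop (k + 1) := by
      rw [← List.tail_drop, ← hu]; rfl
    by_cases hx : x = c
    · subst hx
      simp [pvFind] at hf
      subst hf
      have hk : tl[k]? = some x := by
        have h0 : (tl.drop k)[0]? = some x := by rw [← hu]; simp
        simpa using h0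
      have hklen : k < tl.length := (List.getElem?_eq_some_iff.mp hk).1
      rw [pvOuterA, if_neg (by simp)]
      rw [pvChainA_eq_CH tl cs k hklen]
      simp only [Nat.add_zero] at hch
      rw [hch]
      simp
    · simp only [pvFind, hx, if_false, Option.map_eq_some_iff] at hf
      obtain ⟨d', hd', rfl⟩ := hf
      rw [pvOuterA, if_pos (by simpa using hx)]
      have harr : k + 1 + d' = k + (d' + 1) := by omega
      have := ih (k + 1) d' e hnext hd' (by rw [harr]; exact hch)
      rw [harr] at this
      exact this

-- per-word equivalence of the two matchers (word lowered nonempty)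
theorem pvMatch_eq (tl : List Char) (word : String)
    (hw : (PySem.Str.lower word).toList ≠ []) :
    pvEarliestMatch tl word = pvScan tl word := by
  rcases hlw : (PySem.Str.lower word).toList with _ | ⟨c, cs⟩
  · exact absurd hlw hw
  have hA : pvEarliestMatch tl word = pvOuterA tl c cs 0 tl := by
    rw [pvEarliestMatch, hlw]
  have hB : pvScan tl word =
      (match pvScanLoop tl 0 (c :: cs) (-1) (-1) with
       | ([], start, last) => some (start, last)
       | _ => none) := by
    rw [pvScan, hlw]
  rw [hA, hB]
  cases hf : pvFind c tl with
  | none =>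
    have hsf : pvScanLoop tl 0 (c :: cs) (-1) (-1) = (c :: cs, -1, -1) := by
      rw [pvScanLoop_find, hf]
    rw [hsf, pvOuterA_none tl c cs tl 0 (by simp)
      (fun j _ hj => absurd (List.mem_of_getElem? hj) ((pvFind_none_iff c tl).mp hf))]
  | some d =>
    have hd : d < tl.length := pvFind_some_lt c tl d hf
    have hsf : pvScanLoop tl 0 (c :: cs) (-1) (-1) =
        pvScanLoop (tl.drop (d + 1)) (((d : Nat) : Int) + 1) cs ((d : Nat) : Int) ((d : Nat) : Int) := by
      rw [pvScanLoop_find, hf]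
      show pvScanLoop (tl.drop (d + 1)) ((0 : Int) + d + 1) cs
          (if (-1 : Int) < 0 then (0 : Int) + d else -1) ((0 : Int) + d) = _
      rw [if_pos (by norm_num)]
      have e0 : (0 : Int) + (d : Int) + 1 = ((d : Nat) : Int) + 1 := by ring
      have e0' : (0 : Int) + (d : Int) = ((d : Nat) : Int) := by ring
      rw [e0, e0']
    rw [hsf]
    have hscan := pvScanLoop_CH tl cs d hd ((d : Nat) : Int) (by positivity)
    cases hch : pvCH tl cs d with
    | some e =>
      rw [hch] at hscan
      rw [hscan, pvOuterA_some tl c cs tl 0 d e (by simp) hf (by simpa using hch)]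
      simp
    | none =>
      rw [hch] at hscan
      rw [pvOuterA_none tl c cs tl 0 (by simp)
        (fun j _ hj => pvCH_mono_none tl cs d j (pvFind_some_min c tl d hf j hj) hch)]
      rcases hres : pvScanLoop (tl.drop (d + 1)) (((d : Nat) : Int) + 1) cs ((d : Nat) : Int) ((d : Nat) : Int) with ⟨rem', s', l'⟩
      rw [hres] at hscan
      cases rem' with
      | nil => exact absurd rfl hscan
      | cons a b => rfl

-- fold over filterMap = fold with inline option handling
theorem pvFold_filterMap (tl : List Char) (l : List String)
    (hl : ∀ m ∈ l, (PySem.Str.lower m).toList ≠ []) (b : Option (Int × Int × String)) :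
    (l.filterMap (fun m => (pvScan tl m).map (fun p => (p.1, p.2, m)))).foldl
      (fun best r =>
        match best with
        | none => some r
        | some bb => if r.1 < bb.1 ∨ (r.1 = bb.1 ∧ r.2.1 < bb.2.1) then some r else best) b =
    l.foldl
      (fun best m =>
        match pvEarliestMatch tl m with
        | none => best
        | some r =>
          match best with
          | none => some (r.1, r.2, m)
          | some bb => if r.1 < bb.1 ∨ (r.1 = bb.1 ∧ r.2 < bb.2.1) then some (r.1, r.2, m) else best) b := by
  induction l generalizing b with
  | nil => rfl
  | cons m l ih =>
    rw [List.filterMap_cons]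
    rw [List.foldl_cons, pvMatch_eq tl m (hl m (by simp))]
    cases h : pvScan tl m with
    | none =>
      simp only [Option.map_none]
      exact ih (fun m hm => hl m (by simp [hm])) b
    | some r =>
      simp only [Option.map_some, List.foldl_cons]
      cases b with
      | none => exact ih (fun m hm => hl m (by simp [hm])) _
      | some bb => exact ih (fun m hm => hl m (by simp [hm])) _

-- ===== VERDICT (by name: the statement is the Claim_ definition above) =====
theorem detect_monster_spec : Claim_equal_detect_monster := by
  intro s _
  unfold Spec_detect_monster detect_monster detect_monster_alt
  by_cases hs : s = ""
  · simp [hs]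
  · rw [if_neg hs, if_neg hs]
    simp only
    rw [pvFold_filterMap ((PySem.Str.lower s).toList) pvMonsters ?_]
    intro m hm
    fin_cases hm <;> decide
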